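-- pv_equiv track=rewrite | github.com/Magenta195/Algorithm | 백준/Gold/20437. 문자열 게임 2/문자열 게임 2.py | find_string
-- ===== SOURCE A (Python) =====
-- from collections import defaultdict
--
-- def find_string(K, W) :
--   minval, maxval = len(W)+1, -1
--   alphabet_dict = defaultdict(list)
--   for i in range(len(W)) :
--     alphabet_dict[W[i]].append(i)
--
--   for idx_list in alphabet_dict.values() :
--     if len(idx_list) < K :
--       continue
--     for i in range(len(idx_list)-K+1) :
--       minval = min(minval, idx_list[i+K-1] - idx_list[i] + 1)
--       maxval = max(maxval, idx_list[i+K-1] - idx_list[i] + 1)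
--   return minval, maxval
-- ===== SOURCE B (Python) =====
-- def find_string(K, W):
--     minval, maxval = len(W) + 1, -1
--     positions = {}
--     for i, ch in enumerate(W):
--         lst = positions.get(ch, [])
--         lst.append(i)
--         positions[ch] = lst
--         if len(lst) >= K:
--             span = i - lst[-K] + 1
--             minval = min(minval, span)
--             maxval = max(maxval, span)
--     return minval, maxval
-- ===== Notes on version B (the rewrite author's own statement) =====
-- stated objective: alternative
-- what changed: B fuses everything into a single pass over W: it updates the per-character position list and folds min/max over the window span (i - lst[-K] + 1) online the moment a character's K-th recent occurrence appears, instead of A's two-phase build-all-groups-then-scan-all-windows loop.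
import Mathlib
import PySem

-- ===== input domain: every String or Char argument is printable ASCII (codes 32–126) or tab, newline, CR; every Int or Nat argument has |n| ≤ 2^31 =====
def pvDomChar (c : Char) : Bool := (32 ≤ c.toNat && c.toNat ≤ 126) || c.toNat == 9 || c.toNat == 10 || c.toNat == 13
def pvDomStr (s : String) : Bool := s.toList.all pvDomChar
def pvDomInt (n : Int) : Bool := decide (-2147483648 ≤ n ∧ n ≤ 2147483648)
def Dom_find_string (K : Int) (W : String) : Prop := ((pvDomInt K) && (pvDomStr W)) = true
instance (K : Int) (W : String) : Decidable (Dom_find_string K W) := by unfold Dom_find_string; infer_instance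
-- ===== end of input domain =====

-- B fuses A's two phases (group all indices per character, then scan every group's windows)
-- into a single pass that updates min/max online; equal return values proved for K ≥ 1 (or empty W).


-- ===== PORT A =====
def find_string (K : Int) (W : String) : Int × Int :=
  ((PySem.List.pyRange 0 (PySem.Str.len W) 1).foldl
      (fun d i => d.modify ((PySem.Str.pyGet? W i).getD ' ') [] (fun l => l ++ [i]))
      (PySem.Dict.empty : PySem.Dict Char (List Int))).values.foldl
    (fun mm idx_list =>
      if PySem.List.len idx_list < K then mm
      else
        (PySem.List.pyRange 0 (PySem.List.len idx_list - K + 1) 1).foldl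
          (fun mm i =>
            (min mm.1 (PySem.List.pyGetD idx_list (i + K - 1) 0 - PySem.List.pyGetD idx_list i 0 + 1),
             max mm.2 (PySem.List.pyGetD idx_list (i + K - 1) 0 - PySem.List.pyGetD idx_list i 0 + 1))) mm)
    (PySem.Str.len W + 1, -1)

-- ===== PORT B =====
def find_string_alt (K : Int) (W : String) : Int × Int :=
  ((PySem.List.enumerate W.toList 0).foldl
    (fun (st : (Int × Int) × PySem.Dict Char (List Int)) p =>
      let lst := st.2.getD p.2 [] ++ [p.1]
      let d' := st.2.insert p.2 lst
      if K ≤ PySem.List.len lst then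
        let span := p.1 - PySem.List.pyGetD lst (-K) 0 + 1
        ((min st.1.1 span, max st.1.2 span), d')
      else (st.1, d'))
    ((PySem.Str.len W + 1, -1), PySem.Dict.empty)).1

-- ===== PRECONDITION & SPEC =====
-- Pre_ excludes exactly the inputs on which A raises IndexError: for K ≤ 0 and non-empty W,
-- A's inner loop indexes idx_list out of range (at i = len(idx_list)-K at the latest).
def Pre_find_string (K : Int) (W : String) : Prop := 1 ≤ K ∨ W = ""
instance (K : Int) (W : String) : Decidable (Pre_find_string K W) := by unfold Pre_find_string; infer_instance
def pvWitness_find_string : Int × String := (2, "aabba")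

def Spec_find_string (K : Int) (W : String) (out : Int × Int) : Prop := out = find_string_alt K W
instance (K : Int) (W : String) (out : Int × Int) : Decidable (Spec_find_string K W out) := by unfold Spec_find_string; infer_instance

-- ===== CLAIM (what is proved, stated in full; the proofs are below) =====
def Claim_equal_find_string : Prop := ∀ (K : Int) (W : String), Dom_find_string K W → Pre_find_string K W → Spec_find_string K W (find_string K W)

-- ===== LEMMAS AND PROOFS =====

def pvWin (k : Nat) (l : List Int) : List Int :=
  (List.range (l.length + 1 - k)).map (fun j => l.getD (j + k - 1) 0 - l.getD j 0 + 1)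
def pvExt (k : Nat) (l : List Int) (a : Int) : List Int :=
  if k ≤ l.length + 1 then [a - (l ++ [a]).getD (l.length + 1 - k) 0 + 1] else []

theorem pvWin_snoc (k : Nat) (hk : 1 ≤ k) (l : List Int) (a : Int) :
    pvWin k (l ++ [a]) = pvWin k l ++ pvExt k l a := by
  unfold pvWin pvExt
  simp only [List.length_append, List.length_singleton]
  by_cases h : k ≤ l.length + 1
  · have hm : l.length + 1 + 1 - k = (l.length + 1 - k) + 1 := by omega
    rw [if_pos h, hm, List.range_succ, List.map_append]
    congr 1
    · apply List.map_congr_left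
      intro j hj
      rw [List.mem_range] at hj
      rw [List.getD_append _ _ _ _ (by omega), List.getD_append _ _ _ _ (by omega)]
    · simp only [List.map_cons, List.map_nil]
      congr 2
      have h2 : l.length + 1 - k + k - 1 = l.length := by omega
      rw [h2]
      rw [List.getD_eq_getElem _ _ (by simp), List.getElem_append_right (by omega)]
      simp
  · rw [if_neg h]
    have h1 : l.length + 1 + 1 - k = 0 := by omega
    have h2 : l.length + 1 - k = 0 := by omega
    rw [h1, h2]
    simp

def pvPos (c : Char) (cs : List Char) : List Int :=
  (PySem.List.enumerate cs 0).filterMap (fun p => if p.2 = c then some p.1 else none)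
def pvM (k : Nat) (cs : List Char) : Multiset Int :=
  ∑ x ∈ cs.toFinset, ((pvWin k (pvPos x cs) : List Int) : Multiset Int)

theorem pvPos_snoc (x c : Char) (cs : List Char) :
    pvPos x (cs ++ [c]) = pvPos x cs ++ (if c = x then [(cs.length : Int)] else []) := by
  unfold pvPos
  rw [PySem.List.enumerate_append, List.filterMap_append]
  congr 1
  rw [PySem.List.enumerate_cons, PySem.List.enumerate_nil]
  by_cases hcx : c = x
  · simp [hcx]
  · simp [hcx]

theorem pvPos_of_not_mem (c : Char) (cs : List Char) (h : c ∉ cs) : pvPos c cs = [] := by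
  unfold pvPos
  rw [List.filterMap_eq_nil_iff]
  intro p hp
  have : p.2 ∈ cs := by
    have := PySem.List.map_snd_enumerate cs (0:Int)
    exact this ▸ List.mem_map_of_mem hp
  have hne : p.2 ≠ c := fun he => h (he ▸ this)
  rw [if_neg hne]

theorem pvWin_nil (k : Nat) (hk : 1 ≤ k) : pvWin k [] = [] := by
  unfold pvWin
  have : 0 + 1 - k = 0 := by omega
  simp [this]

theorem pvM_snoc (k : Nat) (hk : 1 ≤ k) (cs : List Char) (c : Char) :
    pvM k (cs ++ [c]) = pvM k cs + (↑(pvExt k (pvPos c cs) (cs.length : Int)) : Multiset Int) := by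
  unfold pvM
  have hts : (cs ++ [c]).toFinset = insert c cs.toFinset := by
    simp [List.toFinset_append]
  rw [hts]
  have hpt : ∀ x ∈ insert c cs.toFinset,
      ((pvWin k (pvPos x (cs ++ [c])) : List Int) : Multiset Int)
        = (↑(pvWin k (pvPos x cs)) : Multiset Int)
          + (if x = c then (↑(pvExt k (pvPos c cs) (cs.length : Int)) : Multiset Int) else 0) := by
    intro x _
    by_cases hxc : x = c
    · subst hxc
      rw [pvPos_snoc, if_pos rfl, pvWin_snoc k hk, if_pos rfl]
      rw [Multiset.coe_add]
    · rw [pvPos_snoc, if_neg (fun he => hxc he.symm), if_neg hxc, List.append_nil, add_zero]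
  rw [Finset.sum_congr rfl hpt, Finset.sum_add_distrib, Finset.sum_ite_eq' (insert c cs.toFinset) c,
    if_pos (Finset.mem_insert_self c _)]
  congr 1
  by_cases hc : c ∈ cs.toFinset
  · rw [Finset.insert_eq_self.mpr hc]
  · rw [Finset.sum_insert hc, pvPos_of_not_mem c cs (by simpa using hc), pvWin_nil k hk]
    simp

def pvDict (cs : List Char) : PySem.Dict Char (List Int) :=
  (PySem.List.enumerate cs 0).foldl (fun d p => d.insert p.2 (d.getD p.2 [] ++ [p.1])) PySem.Dict.empty

theorem pvDict_snoc (cs : List Char) (c : Char) :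
    pvDict (cs ++ [c]) = (pvDict cs).insert c ((pvDict cs).getD c [] ++ [(cs.length : Int)]) := by
  unfold pvDict
  rw [PySem.List.enumerate_append, List.foldl_append]
  simp [PySem.List.enumerate_cons, PySem.List.enumerate_nil]

theorem pvDict_getD (cs : List Char) (x : Char) : (pvDict cs).getD x [] = pvPos x cs := by
  induction cs using List.reverseRecOn with
  | nil => simp [pvDict, pvPos, PySem.List.enumerate_nil]
  | append_singleton cs c ih =>
    rw [pvDict_snoc, pvPos_snoc]
    by_cases hxc : x = c
    · subst hxc
      rw [PySem.Dict.getD_insert_self, ih, if_pos rfl]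
    · rw [PySem.Dict.getD_insert_of_ne _ _ _ hxc, ih,
        if_neg (fun h => hxc h.symm), List.append_nil]

-- the min/max accumulator step
def pvG (mm : Int × Int) (s : Int) : Int × Int := (min mm.1 s, max mm.2 s)

theorem foldpair (l : List Int) (a b : Int) :
    l.foldl pvG (a, b) = (l.foldl min a, l.foldl max b) := by
  induction l generalizing a b with
  | nil => rfl
  | cons x l ih => simp only [List.foldl_cons]; exact ih _ _

theorem fold_min_add_singleton (m : Multiset Int) (a s : Int) :
    (m + ↑([s] : List Int)).fold min a = min (m.fold min a) s := by
  rw [Multiset.coe_singleton, add_comm, Multiset.singleton_add, Multiset.fold_cons_left, min_comm]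

theorem fold_max_add_singleton (m : Multiset Int) (a s : Int) :
    (m + ↑([s] : List Int)).fold max a = max (m.fold max a) s := by
  rw [Multiset.coe_singleton, add_comm, Multiset.singleton_add, Multiset.fold_cons_left, max_comm]

theorem B_loop (K : Int) (hK : 1 ≤ K) (cs : List Char) (a b : Int) :
    (PySem.List.enumerate cs 0).foldl
      (fun (st : (Int × Int) × PySem.Dict Char (List Int)) p =>
        let lst := st.2.getD p.2 [] ++ [p.1]
        let d' := st.2.insert p.2 lst
        if K ≤ PySem.List.len lst then
          let span := p.1 - PySem.List.pyGetD lst (-K) 0 + 1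
          ((min st.1.1 span, max st.1.2 span), d')
        else (st.1, d'))
      ((a, b), PySem.Dict.empty)
    = (((pvM K.toNat cs).fold min a, (pvM K.toNat cs).fold max b), pvDict cs) := by
  induction cs using List.reverseRecOn with
  | nil =>
    simp [PySem.List.enumerate_nil, pvM, pvDict, PySem.List.enumerate_nil]
  | append_singleton cs c ih =>
    rw [PySem.List.enumerate_append, List.foldl_append]
    simp only [PySem.List.enumerate_cons, PySem.List.enumerate_nil, zero_add, List.foldl_cons,
      List.foldl_nil]
    rw [ih]
    rw [pvDict_snoc, pvDict_getD]
    set l := pvPos c cs with hl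
    set n : Int := (cs.length : Int) with hn
    have hlen : PySem.List.len (l ++ [n]) = (l.length : Int) + 1 := by
      simp [PySem.List.len_eq]
    rw [pvM_snoc K.toNat (by omega) cs c, ← hl, ← hn]
    unfold pvExt
    by_cases hc : K.toNat ≤ l.length + 1
    · rw [if_pos hc]
      have hcond : K ≤ PySem.List.len (l ++ [n]) := by rw [hlen]; omega
      rw [if_pos hcond]
      have hneg : PySem.List.pyGetD (l ++ [n]) (-K) 0 = (l ++ [n]).getD (l.length + 1 - K.toNat) 0 := by
        have hKcast : K = (K.toNat : Int) := by omega
        rw [hKcast, PySem.List.pyGetD_neg_natCast _ _ _ (by omega) (by simp; omega)]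
        rw [List.getD_eq_getElem _ _ (by simp; omega)]
        congr 1
        simp
        omega
      simp only [hneg]
      rw [fold_min_add_singleton, fold_max_add_singleton]
    · rw [if_neg hc]
      have hcond : ¬ K ≤ PySem.List.len (l ++ [n]) := by rw [hlen]; omega
      rw [if_neg hcond]
      simp

theorem pvFoldl_group (L : List Char) (f : Char → List Int) (mm : Int × Int) :
    L.foldl (fun mm k => (f k).foldl pvG mm) mm = ((L.map f).flatten).foldl pvG mm := by
  induction L generalizing mm with
  | nil => rfl
  | cons x L ih => rw [List.foldl_cons, List.map_cons, List.flatten_cons, List.foldl_append, ih]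

theorem pvCoe_flatten_nodup (L : List Char) (hL : L.Nodup) (f : Char → List Int) :
    (((L.map f).flatten : List Int) : Multiset Int) = ∑ x ∈ L.toFinset, ((f x : List Int) : Multiset Int) := by
  induction L with
  | nil => simp
  | cons x L ih =>
    rw [List.map_cons, List.flatten_cons, ← Multiset.coe_add, List.toFinset_cons,
      Finset.sum_insert (by simpa using (List.nodup_cons.mp hL).1), ih (List.nodup_cons.mp hL).2]

-- A's per-group body computes the fold of pvG over the group's windows
theorem pvBodyA (K : Int) (hK : 1 ≤ K) (l : List Int) (mm : Int × Int) :
    (if PySem.List.len l < K then mm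
     else
       (PySem.List.pyRange 0 (PySem.List.len l - K + 1) 1).foldl
         (fun mm i =>
           (min mm.1 (PySem.List.pyGetD l (i + K - 1) 0 - PySem.List.pyGetD l i 0 + 1),
            max mm.2 (PySem.List.pyGetD l (i + K - 1) 0 - PySem.List.pyGetD l i 0 + 1))) mm)
    = (pvWin K.toNat l).foldl pvG mm := by
  by_cases h : PySem.List.len l < K
  · rw [if_pos h]
    have : l.length + 1 - K.toNat = 0 := by
      simp [PySem.List.len_eq] at h; omega
    unfold pvWin
    rw [this]
    rfl
  · rw [if_neg h]
    have hlen : PySem.List.len l = (l.length : Int) := by simp [PySem.List.len_eq]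
    rw [hlen] at h ⊢
    rw [PySem.List.pyRange_one]
    have hM : ((l.length : Int) - K + 1 - 0).toNat = l.length + 1 - K.toNat := by omega
    rw [hM, pvWin, List.foldl_map, List.foldl_map]
    congr 1
    funext mm j
    have h1 : (0 : Int) + (j : Int) + K - 1 = ((j + K.toNat - 1 : Nat) : Int) := by omega
    have h2 : (0 : Int) + (j : Int) = ((j : Nat) : Int) := by omega
    rw [h1, PySem.List.pyGetD_natCast]
    rw [h2, PySem.List.pyGetD_natCast]
    rfl

theorem pvDict_keys (cs : List Char) : (pvDict cs).keys = PySem.Set.ofList cs := by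
  unfold pvDict
  rw [PySem.Dict.keys_foldl_insert_key (PySem.List.enumerate cs 0) (fun p => p.2)
    (fun d p => d.getD p.2 [] ++ [p.1]) PySem.Dict.empty]
  rw [PySem.List.map_snd_enumerate]
  exact PySem.Set.update_nil_left cs

theorem pvA_eq (K : Int) (W : String) (hK : 1 ≤ K) :
    find_string K W
      = ((pvM K.toNat W.toList).fold min (PySem.Str.len W + 1),
         (pvM K.toNat W.toList).fold max (-1)) := by
  unfold find_string
  have hd :
      (PySem.List.pyRange 0 (PySem.Str.len W) 1).foldl
        (fun d i => d.modify ((PySem.Str.pyGet? W i).getD ' ') [] (fun l => l ++ [i]))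
        PySem.Dict.empty = pvDict W.toList := by
    rw [pvDict, PySem.List.enumerate_eq_map_pyRange W.toList ' ', List.foldl_map]
    rfl
  rw [hd]
  rw [PySem.Dict.values_eq_map_keys (pvDict W.toList)
    (pvDict_keys W.toList ▸ PySem.Set.nodup_ofList W.toList) []]
  rw [pvDict_keys]
  have hmap : (PySem.Set.ofList W.toList).map (fun k => (pvDict W.toList).getD k [])
      = (PySem.Set.ofList W.toList).map (fun k => pvPos k W.toList) := by
    apply List.map_congr_left
    intro k _
    exact pvDict_getD W.toList k
  rw [hmap, List.foldl_map]
  have hbody :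
      (fun (mm : Int × Int) k =>
        if PySem.List.len (pvPos k W.toList) < K then mm
        else
          (PySem.List.pyRange 0 (PySem.List.len (pvPos k W.toList) - K + 1) 1).foldl
            (fun mm i =>
              (min mm.1 (PySem.List.pyGetD (pvPos k W.toList) (i + K - 1) 0 - PySem.List.pyGetD (pvPos k W.toList) i 0 + 1),
               max mm.2 (PySem.List.pyGetD (pvPos k W.toList) (i + K - 1) 0 - PySem.List.pyGetD (pvPos k W.toList) i 0 + 1))) mm)
      = (fun (mm : Int × Int) k => (pvWin K.toNat (pvPos k W.toList)).foldl pvG mm) := by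
    funext mm k
    exact pvBodyA K hK (pvPos k W.toList) mm
  rw [hbody, pvFoldl_group (PySem.Set.ofList W.toList)
    (fun k => pvWin K.toNat (pvPos k W.toList)), foldpair]
  have hco : ((((PySem.Set.ofList W.toList).map (fun k => pvWin K.toNat (pvPos k W.toList))).flatten : List Int) : Multiset Int)
      = pvM K.toNat W.toList := by
    rw [pvCoe_flatten_nodup (PySem.Set.ofList W.toList) (PySem.Set.nodup_ofList W.toList)]
    unfold pvM
    apply Finset.sum_congr
    · apply Finset.ext
      intro x
      simp [PySem.Set.mem_ofList]
    · intro x _; rfl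
  rw [← hco]
  rw [Multiset.fold_eq_foldl, Multiset.coe_foldl, Multiset.fold_eq_foldl, Multiset.coe_foldl]

theorem pvB_eq (K : Int) (W : String) (hK : 1 ≤ K) :
    find_string_alt K W
      = ((pvM K.toNat W.toList).fold min (PySem.Str.len W + 1),
         (pvM K.toNat W.toList).fold max (-1)) := by
  unfold find_string_alt
  rw [B_loop K hK W.toList (PySem.Str.len W + 1) (-1)]

theorem pvEmpty_A (K : Int) : find_string K "" = (1, -1) := by
  unfold find_string
  rw [show PySem.Str.len "" = 0 from rfl, PySem.List.pyRange_one_eq_nil (le_refl 0)]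
  rw [List.foldl_nil, show ((PySem.Dict.empty : PySem.Dict Char (List Int)).values) = [] from rfl,
    List.foldl_nil]
  norm_num

theorem pvEmpty_B (K : Int) : find_string_alt K "" = (1, -1) := by
  unfold find_string_alt
  rw [show ("" : String).toList = [] from rfl, PySem.List.enumerate_nil]
  norm_num

-- ===== VERDICT (by name: the statement is the Claim_ definition above) =====
theorem find_string_spec : Claim_equal_find_string := by
  intro K W _ hP
  unfold Spec_find_string
  rcases hP with hK | hW
  · rw [pvA_eq K W hK, pvB_eq K W hK]
  · subst hW
    rw [pvEmpty_A, pvEmpty_B]
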